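-- pv_equiv track=rewrite | github.com/HesaiTechnology/API_Demo | FOTA_Upgrade.py | calCrc32
-- ===== SOURCE A (Python) =====
-- def calCrc32(data):
--     crc_table = [
--         0x00000000, 0x4c11db7, 0x9823b6e, 0xd4326d9, 0x130476dc, 0x17c56b6b, 0x1a864db2, 0x1e475005, 0x2608edb8, 0x22c9f00f, 0x2f8ad6d6,
--         0x2b4bcb61, 0x350c9b64, 0x31cd86d3, 0x3c8ea00a, 0x384fbdbd, 0x4c11db70, 0x48d0c6c7, 0x4593e01e, 0x4152fda9, 0x5f15adac, 0x5bd4b01b,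
--         0x569796c2, 0x52568b75, 0x6a1936c8, 0x6ed82b7f, 0x639b0da6, 0x675a1011, 0x791d4014, 0x7ddc5da3, 0x709f7b7a, 0x745e66cd, 0x9823b6e0,
--         0x9ce2ab57, 0x91a18d8e, 0x95609039, 0x8b27c03c, 0x8fe6dd8b, 0x82a5fb52, 0x8664e6e5, 0xbe2b5b58, 0xbaea46ef, 0xb7a96036, 0xb3687d81,
--         0xad2f2d84, 0xa9ee3033, 0xa4ad16ea, 0xa06c0b5d, 0xd4326d90, 0xd0f37027, 0xddb056fe, 0xd9714b49, 0xc7361b4c, 0xc3f706fb, 0xceb42022,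
--         0xca753d95, 0xf23a8028, 0xf6fb9d9f, 0xfbb8bb46, 0xff79a6f1, 0xe13ef6f4, 0xe5ffeb43, 0xe8bccd9a, 0xec7dd02d, 0x34867077, 0x30476dc0,
--         0x3d044b19, 0x39c556ae, 0x278206ab, 0x23431b1c, 0x2e003dc5, 0x2ac12072, 0x128e9dcf, 0x164f8078, 0x1b0ca6a1, 0x1fcdbb16, 0x18aeb13,
--         0x54bf6a4, 0x808d07d, 0xcc9cdca, 0x7897ab07, 0x7c56b6b0, 0x71159069, 0x75d48dde, 0x6b93dddb, 0x6f52c06c, 0x6211e6b5, 0x66d0fb02,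
--         0x5e9f46bf, 0x5a5e5b08, 0x571d7dd1, 0x53dc6066, 0x4d9b3063, 0x495a2dd4, 0x44190b0d, 0x40d816ba, 0xaca5c697, 0xa864db20, 0xa527fdf9,
--         0xa1e6e04e, 0xbfa1b04b, 0xbb60adfc, 0xb6238b25, 0xb2e29692, 0x8aad2b2f, 0x8e6c3698, 0x832f1041, 0x87ee0df6, 0x99a95df3, 0x9d684044,
--         0x902b669d, 0x94ea7b2a, 0xe0b41de7, 0xe4750050, 0xe9362689, 0xedf73b3e, 0xf3b06b3b, 0xf771768c, 0xfa325055, 0xfef34de2, 0xc6bcf05f,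
--         0xc27dede8, 0xcf3ecb31, 0xcbffd686, 0xd5b88683, 0xd1799b34, 0xdc3abded, 0xd8fba05a, 0x690ce0ee, 0x6dcdfd59, 0x608edb80, 0x644fc637,
--         0x7a089632, 0x7ec98b85, 0x738aad5c, 0x774bb0eb, 0x4f040d56, 0x4bc510e1, 0x46863638, 0x42472b8f, 0x5c007b8a, 0x58c1663d, 0x558240e4,
--         0x51435d53, 0x251d3b9e, 0x21dc2629, 0x2c9f00f0, 0x285e1d47, 0x36194d42, 0x32d850f5, 0x3f9b762c, 0x3b5a6b9b, 0x315d626, 0x7d4cb91,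
--         0xa97ed48, 0xe56f0ff, 0x1011a0fa, 0x14d0bd4d, 0x19939b94, 0x1d528623, 0xf12f560e, 0xf5ee4bb9, 0xf8ad6d60, 0xfc6c70d7, 0xe22b20d2,
--         0xe6ea3d65, 0xeba91bbc, 0xef68060b, 0xd727bbb6, 0xd3e6a601, 0xdea580d8, 0xda649d6f, 0xc423cd6a, 0xc0e2d0dd, 0xcda1f604, 0xc960ebb3,
--         0xbd3e8d7e, 0xb9ff90c9, 0xb4bcb610, 0xb07daba7, 0xae3afba2, 0xaafbe615, 0xa7b8c0cc, 0xa379dd7b, 0x9b3660c6, 0x9ff77d71, 0x92b45ba8,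
--         0x9675461f, 0x8832161a, 0x8cf30bad, 0x81b02d74, 0x857130c3, 0x5d8a9099, 0x594b8d2e, 0x5408abf7, 0x50c9b640, 0x4e8ee645, 0x4a4ffbf2,
--         0x470cdd2b, 0x43cdc09c, 0x7b827d21, 0x7f436096, 0x7200464f, 0x76c15bf8, 0x68860bfd, 0x6c47164a, 0x61043093, 0x65c52d24, 0x119b4be9,
--         0x155a565e, 0x18197087, 0x1cd86d30, 0x29f3d35, 0x65e2082, 0xb1d065b, 0xfdc1bec, 0x3793a651, 0x3352bbe6, 0x3e119d3f, 0x3ad08088,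
--         0x2497d08d, 0x2056cd3a, 0x2d15ebe3, 0x29d4f654, 0xc5a92679, 0xc1683bce, 0xcc2b1d17, 0xc8ea00a0, 0xd6ad50a5, 0xd26c4d12, 0xdf2f6bcb,
--         0xdbee767c, 0xe3a1cbc1, 0xe760d676, 0xea23f0af, 0xeee2ed18, 0xf0a5bd1d, 0xf464a0aa, 0xf9278673, 0xfde69bc4, 0x89b8fd09, 0x8d79e0be,
--         0x803ac667, 0x84fbdbd0, 0x9abc8bd5, 0x9e7d9662, 0x933eb0bb, 0x97ffad0c, 0xafb010b1, 0xab710d06, 0xa6322bdf, 0xa2f33668, 0xbcb4666d,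
--         0xb8757bda, 0xb5365d03, 0xb1f740b4]
--
--     crc = 0xffffffff
--     for i in range(len(data)):
--         crc = ((crc<<8)&0xffffffff) ^ crc_table[((crc>>24)^data[i])&0xff]
--
--     return crc
-- ===== SOURCE B (Python) =====
-- def calCrc32(data):
--     crc = 0xffffffff
--     for i in range(len(data)):
--         crc = (crc ^ (data[i] << 24)) & 0xffffffff
--         for _ in range(8):
--             if crc & 0x80000000:
--                 crc = ((crc << 1) ^ 0x04C11DB7) & 0xffffffff
--             else:
--                 crc = (crc << 1) & 0xffffffff
--     return crc
-- ===== Notes on version B (the rewrite author's own statement) =====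
-- stated objective: simpler
-- what changed: Replaced A's precomputed 256-entry CRC table and per-byte table lookup by the classic bit-serial CRC-32/MPEG-2 loop (poly 0x04C11DB7, MSB-first, init 0xFFFFFFFF, no final XOR): XOR each byte into the top of the register and run eight shift/XOR steps.
import Mathlib
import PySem

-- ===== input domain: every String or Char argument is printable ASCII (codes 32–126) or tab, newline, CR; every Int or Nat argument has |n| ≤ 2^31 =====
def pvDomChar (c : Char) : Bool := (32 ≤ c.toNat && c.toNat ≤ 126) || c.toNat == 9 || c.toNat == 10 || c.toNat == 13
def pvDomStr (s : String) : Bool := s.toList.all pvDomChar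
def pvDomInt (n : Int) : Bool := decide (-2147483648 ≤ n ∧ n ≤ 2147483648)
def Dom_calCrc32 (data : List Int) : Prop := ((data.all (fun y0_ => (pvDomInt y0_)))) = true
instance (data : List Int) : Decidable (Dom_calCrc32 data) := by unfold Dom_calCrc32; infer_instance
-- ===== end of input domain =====

-- B replaces A's 256-entry lookup table by the classic bit-serial CRC-32/MPEG-2 loop
-- (poly 0x04C11DB7, MSB-first, init 0xFFFFFFFF, no final XOR): simpler, no table.

-- ===== PORT A =====
def pvCrcTable : List Int := [
    0x00000000, 0x4c11db7, 0x9823b6e, 0xd4326d9, 0x130476dc, 0x17c56b6b, 0x1a864db2, 0x1e475005,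
    0x2608edb8, 0x22c9f00f, 0x2f8ad6d6, 0x2b4bcb61, 0x350c9b64, 0x31cd86d3, 0x3c8ea00a, 0x384fbdbd,
    0x4c11db70, 0x48d0c6c7, 0x4593e01e, 0x4152fda9, 0x5f15adac, 0x5bd4b01b, 0x569796c2, 0x52568b75,
    0x6a1936c8, 0x6ed82b7f, 0x639b0da6, 0x675a1011, 0x791d4014, 0x7ddc5da3, 0x709f7b7a, 0x745e66cd,
    0x9823b6e0, 0x9ce2ab57, 0x91a18d8e, 0x95609039, 0x8b27c03c, 0x8fe6dd8b, 0x82a5fb52, 0x8664e6e5,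
    0xbe2b5b58, 0xbaea46ef, 0xb7a96036, 0xb3687d81, 0xad2f2d84, 0xa9ee3033, 0xa4ad16ea, 0xa06c0b5d,
    0xd4326d90, 0xd0f37027, 0xddb056fe, 0xd9714b49, 0xc7361b4c, 0xc3f706fb, 0xceb42022, 0xca753d95,
    0xf23a8028, 0xf6fb9d9f, 0xfbb8bb46, 0xff79a6f1, 0xe13ef6f4, 0xe5ffeb43, 0xe8bccd9a, 0xec7dd02d,
    0x34867077, 0x30476dc0, 0x3d044b19, 0x39c556ae, 0x278206ab, 0x23431b1c, 0x2e003dc5, 0x2ac12072,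
    0x128e9dcf, 0x164f8078, 0x1b0ca6a1, 0x1fcdbb16, 0x18aeb13, 0x54bf6a4, 0x808d07d, 0xcc9cdca,
    0x7897ab07, 0x7c56b6b0, 0x71159069, 0x75d48dde, 0x6b93dddb, 0x6f52c06c, 0x6211e6b5, 0x66d0fb02,
    0x5e9f46bf, 0x5a5e5b08, 0x571d7dd1, 0x53dc6066, 0x4d9b3063, 0x495a2dd4, 0x44190b0d, 0x40d816ba,
    0xaca5c697, 0xa864db20, 0xa527fdf9, 0xa1e6e04e, 0xbfa1b04b, 0xbb60adfc, 0xb6238b25, 0xb2e29692,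
    0x8aad2b2f, 0x8e6c3698, 0x832f1041, 0x87ee0df6, 0x99a95df3, 0x9d684044, 0x902b669d, 0x94ea7b2a,
    0xe0b41de7, 0xe4750050, 0xe9362689, 0xedf73b3e, 0xf3b06b3b, 0xf771768c, 0xfa325055, 0xfef34de2,
    0xc6bcf05f, 0xc27dede8, 0xcf3ecb31, 0xcbffd686, 0xd5b88683, 0xd1799b34, 0xdc3abded, 0xd8fba05a,
    0x690ce0ee, 0x6dcdfd59, 0x608edb80, 0x644fc637, 0x7a089632, 0x7ec98b85, 0x738aad5c, 0x774bb0eb,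
    0x4f040d56, 0x4bc510e1, 0x46863638, 0x42472b8f, 0x5c007b8a, 0x58c1663d, 0x558240e4, 0x51435d53,
    0x251d3b9e, 0x21dc2629, 0x2c9f00f0, 0x285e1d47, 0x36194d42, 0x32d850f5, 0x3f9b762c, 0x3b5a6b9b,
    0x315d626, 0x7d4cb91, 0xa97ed48, 0xe56f0ff, 0x1011a0fa, 0x14d0bd4d, 0x19939b94, 0x1d528623,
    0xf12f560e, 0xf5ee4bb9, 0xf8ad6d60, 0xfc6c70d7, 0xe22b20d2, 0xe6ea3d65, 0xeba91bbc, 0xef68060b,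
    0xd727bbb6, 0xd3e6a601, 0xdea580d8, 0xda649d6f, 0xc423cd6a, 0xc0e2d0dd, 0xcda1f604, 0xc960ebb3,
    0xbd3e8d7e, 0xb9ff90c9, 0xb4bcb610, 0xb07daba7, 0xae3afba2, 0xaafbe615, 0xa7b8c0cc, 0xa379dd7b,
    0x9b3660c6, 0x9ff77d71, 0x92b45ba8, 0x9675461f, 0x8832161a, 0x8cf30bad, 0x81b02d74, 0x857130c3,
    0x5d8a9099, 0x594b8d2e, 0x5408abf7, 0x50c9b640, 0x4e8ee645, 0x4a4ffbf2, 0x470cdd2b, 0x43cdc09c,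
    0x7b827d21, 0x7f436096, 0x7200464f, 0x76c15bf8, 0x68860bfd, 0x6c47164a, 0x61043093, 0x65c52d24,
    0x119b4be9, 0x155a565e, 0x18197087, 0x1cd86d30, 0x29f3d35, 0x65e2082, 0xb1d065b, 0xfdc1bec,
    0x3793a651, 0x3352bbe6, 0x3e119d3f, 0x3ad08088, 0x2497d08d, 0x2056cd3a, 0x2d15ebe3, 0x29d4f654,
    0xc5a92679, 0xc1683bce, 0xcc2b1d17, 0xc8ea00a0, 0xd6ad50a5, 0xd26c4d12, 0xdf2f6bcb, 0xdbee767c,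
    0xe3a1cbc1, 0xe760d676, 0xea23f0af, 0xeee2ed18, 0xf0a5bd1d, 0xf464a0aa, 0xf9278673, 0xfde69bc4,
    0x89b8fd09, 0x8d79e0be, 0x803ac667, 0x84fbdbd0, 0x9abc8bd5, 0x9e7d9662, 0x933eb0bb, 0x97ffad0c,
    0xafb010b1, 0xab710d06, 0xa6322bdf, 0xa2f33668, 0xbcb4666d, 0xb8757bda, 0xb5365d03, 0xb1f740b4]

def calCrc32 (data : List Int) : Int :=
  (PySem.List.pyRange 0 (data.length : Int) 1).foldl
    (fun crc i =>
      PySem.Int.bxor (PySem.Int.band (crc <<< (8:Nat)) 0xffffffff)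
        (PySem.List.pyGetD pvCrcTable
          (PySem.Int.band (PySem.Int.bxor (crc >>> (24:Nat)) (PySem.List.pyGetD data i 0)) 0xff) 0))
    0xffffffff

-- ===== PORT B =====
-- one iteration of B's inner 'for _ in range(8)' body
def pvBitStep (crc : Int) : Int :=
  if PySem.Int.band crc 0x80000000 ≠ 0 then
    PySem.Int.band (PySem.Int.bxor (crc <<< (1:Nat)) 0x04C11DB7) 0xffffffff
  else
    PySem.Int.band (crc <<< (1:Nat)) 0xffffffff

def calCrc32_alt (data : List Int) : Int :=
  (PySem.List.pyRange 0 (data.length : Int) 1).foldl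
    (fun crc i =>
      (PySem.List.pyRange 0 8 1).foldl (fun c _ => pvBitStep c)
        (PySem.Int.band (PySem.Int.bxor crc ((PySem.List.pyGetD data i 0) <<< (24:Nat))) 0xffffffff))
    0xffffffff

-- ===== PRECONDITION & SPEC =====
def Spec_calCrc32 (data : List Int) (out : Int) : Prop := out = calCrc32_alt data
instance (data : List Int) (out : Int) : Decidable (Spec_calCrc32 data out) := by unfold Spec_calCrc32; infer_instance

-- ===== CLAIM (what is proved, stated in full; the proofs are below) =====
def Claim_equal_calCrc32 : Prop := ∀ (data : List Int), Dom_calCrc32 data → Spec_calCrc32 data (calCrc32 data)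

-- ===== LEMMAS AND PROOFS =====

-- Nat model of one bit-serial step (crc ^= poly when bit 31 set, shift, mask to 32 bits)
def natStep (n : Nat) : Nat :=
  if n.testBit 31 then ((n * 2) ^^^ 79764919) % 4294967296 else (n * 2) % 4294967296

def natStep8 (n : Nat) : Nat :=
  natStep (natStep (natStep (natStep (natStep (natStep (natStep (natStep n)))))))

lemma natStep_lt (n : Nat) : natStep n < 4294967296 := by
  unfold natStep; split <;> omega

lemma mul2_xor (x y : Nat) : (x ^^^ y) * 2 = x * 2 ^^^ y * 2 := by
  have h : ∀ a : Nat, a * 2 = a <<< 1 := fun a => by simp [Nat.shiftLeft_eq]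
  rw [h, h, h]
  apply Nat.eq_of_testBit_eq
  intro i
  rw [Nat.testBit_xor]
  cases i with
  | zero => simp [Nat.testBit_shiftLeft]
  | succ j => simp [Nat.testBit_shiftLeft, Nat.testBit_xor]

lemma xor_mod32 (x y : Nat) : (x ^^^ y) % 4294967296 = x % 4294967296 ^^^ y % 4294967296 := by
  have := Nat.xor_mod_two_pow (a := x) (b := y) (n := 32)
  norm_num at this
  exact this

lemma natStep_xor (x y : Nat) : natStep (x ^^^ y) = natStep x ^^^ natStep y := by
  unfold natStep
  rw [Nat.testBit_xor]
  rcases hx : x.testBit 31 <;> rcases hy : y.testBit 31 <;>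
    simp only [hx, hy, Bool.xor_false, Bool.xor_true, Bool.not_false, Bool.not_true,
      Bool.false_eq_true, Bool.true_eq_false, if_true, if_false, ite_true, ite_false] <;>
    rw [← xor_mod32] <;> congr 1 <;>
    simp [mul2_xor, Nat.xor_assoc, Nat.xor_comm, Nat.xor_left_comm]

lemma natStep8_xor (x y : Nat) : natStep8 (x ^^^ y) = natStep8 x ^^^ natStep8 y := by
  simp [natStep8, natStep_xor]

lemma natStep_small {n : Nat} (h : n < 2147483648) : natStep n = n * 2 := by
  unfold natStep
  rw [Nat.testBit_lt_two_pow (x := n) (i := 31) (by omega)]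
  simp
  omega

lemma natStep8_low {l : Nat} (h : l < 16777216) : natStep8 l = l * 256 := by
  unfold natStep8
  rw [natStep_small (show l < 2147483648 by omega)]
  rw [natStep_small (show l * 2 < 2147483648 by omega)]
  rw [natStep_small (show l * 2 * 2 < 2147483648 by omega)]
  rw [natStep_small (show l * 2 * 2 * 2 < 2147483648 by omega)]
  rw [natStep_small (show l * 2 * 2 * 2 * 2 < 2147483648 by omega)]
  rw [natStep_small (show l * 2 * 2 * 2 * 2 * 2 < 2147483648 by omega)]
  rw [natStep_small (show l * 2 * 2 * 2 * 2 * 2 * 2 < 2147483648 by omega)]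
  rw [natStep_small (show l * 2 * 2 * 2 * 2 * 2 * 2 * 2 < 2147483648 by omega)]
  omega

-- complement, via BitVec.toNat_not
lemma compl_two_pow {n a : Nat} (h : a < 2 ^ n) : a ^^^ (2 ^ n - 1) = 2 ^ n - 1 - a := by
  have h1 : (~~~(BitVec.ofNat n a)).toNat = 2 ^ n - 1 - (BitVec.ofNat n a).toNat :=
    BitVec.toNat_not
  rw [← BitVec.xor_allOnes, BitVec.toNat_xor, BitVec.toNat_allOnes, BitVec.toNat_ofNat,
    Nat.mod_eq_of_lt h] at h1
  exact h1

lemma compl8 {a : Nat} (h : a < 256) : a ^^^ 255 = 255 - a := by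
  have := compl_two_pow (n := 8) (a := a) (by omega)
  norm_num at this
  exact this

lemma compl32 {a : Nat} (h : a < 4294967296) : a ^^^ 4294967295 = 4294967295 - a := by
  have := compl_two_pow (n := 32) (a := a) (by omega)
  norm_num at this
  exact this

lemma xor_mod8 (x y : Nat) : (x ^^^ y) % 256 = x % 256 ^^^ y % 256 := by
  have := Nat.xor_mod_two_pow (a := x) (b := y) (n := 8)
  norm_num at this
  exact this

-- Python x & 255 / x & 0xffffffff are mod 2^8 / 2^32, for every sign of x
lemma band_255 (x : Int) : PySem.Int.band x 255 = x % 256 := by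
  unfold PySem.Int.band
  by_cases hx : (0 : Int) ≤ x
  · rw [if_pos hx, if_pos (by norm_num)]
    rw [show x.toNat &&& (255 : Int).toNat = x.toNat % 256 from by
      simpa using Nat.and_two_pow_sub_one_eq_mod x.toNat 8]
    omega
  · rw [if_neg hx, if_pos (by norm_num)]
    rw [show (255 : Int).toNat &&& (-x - 1).toNat = (-x - 1).toNat % 256 from by
      rw [Nat.land_comm]; simpa using Nat.and_two_pow_sub_one_eq_mod (-x - 1).toNat 8]
    omega

lemma band_M (x : Int) : PySem.Int.band x 4294967295 = x % 4294967296 := by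
  unfold PySem.Int.band
  by_cases hx : (0 : Int) ≤ x
  · rw [if_pos hx, if_pos (by norm_num)]
    rw [show x.toNat &&& (4294967295 : Int).toNat = x.toNat % 4294967296 from by
      simpa using Nat.and_two_pow_sub_one_eq_mod x.toNat 32]
    omega
  · rw [if_neg hx, if_pos (by norm_num)]
    rw [show (4294967295 : Int).toNat &&& (-x - 1).toNat = (-x - 1).toNat % 4294967296 from by
      rw [Nat.land_comm]; simpa using Nat.and_two_pow_sub_one_eq_mod (-x - 1).toNat 32]
    omega

-- (h ^ d) % 256 for 0 ≤ h and arbitrary d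
lemma bxor_mod_256 (h d : Int) (hh : 0 ≤ h) :
    (PySem.Int.bxor h d) % 256 = ((h.toNat % 256 ^^^ (d % 256).toNat : Nat) : Int) := by
  unfold PySem.Int.bxor
  by_cases hd : (0 : Int) ≤ d
  · rw [if_pos hh, if_pos hd]
    have hb : (d % 256).toNat = d.toNat % 256 := by omega
    have e : ((h.toNat ^^^ d.toNat : Nat) : Int) % 256 = (((h.toNat ^^^ d.toNat) % 256 : Nat) : Int) := by omega
    rw [hb, e, xor_mod8]
  · rw [if_pos hh, if_neg hd]
    have hy : (d % 256).toNat = 255 - (-d - 1).toNat % 256 := by omega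
    have h1 : (-(((h.toNat ^^^ (-d - 1).toNat : Nat) : Int)) - 1) % 256
        = ((255 - (h.toNat ^^^ (-d - 1).toNat) % 256 : Nat) : Int) := by omega
    rw [hy, h1]
    congr 1
    rw [xor_mod8]
    have hx : h.toNat % 256 ^^^ (-d - 1).toNat % 256 < 256 := by
      have := Nat.xor_lt_two_pow (n := 8) (x := h.toNat % 256) (y := (-d - 1).toNat % 256)
        (by omega) (by omega)
      omega
    rw [← compl8 hx, ← compl8 (show (-d - 1).toNat % 256 < 256 by omega), Nat.xor_assoc]

lemma bxor_mod_2_32 (c e : Int) (hc : 0 ≤ c) :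
    (PySem.Int.bxor c e) % 4294967296 = ((c.toNat % 4294967296 ^^^ (e % 4294967296).toNat : Nat) : Int) := by
  unfold PySem.Int.bxor
  by_cases he : (0 : Int) ≤ e
  · rw [if_pos hc, if_pos he]
    have hb : (e % 4294967296).toNat = e.toNat % 4294967296 := by omega
    have ee : ((c.toNat ^^^ e.toNat : Nat) : Int) % 4294967296
        = (((c.toNat ^^^ e.toNat) % 4294967296 : Nat) : Int) := by omega
    rw [hb, ee, xor_mod32]
  · rw [if_pos hc, if_neg he]
    have hy : (e % 4294967296).toNat = 4294967295 - (-e - 1).toNat % 4294967296 := by omega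
    have h1 : (-(((c.toNat ^^^ (-e - 1).toNat : Nat) : Int)) - 1) % 4294967296
        = ((4294967295 - (c.toNat ^^^ (-e - 1).toNat) % 4294967296 : Nat) : Int) := by omega
    rw [hy, h1]
    congr 1
    rw [xor_mod32]
    have hx : c.toNat % 4294967296 ^^^ (-e - 1).toNat % 4294967296 < 4294967296 := by
      have := Nat.xor_lt_two_pow (n := 32) (x := c.toNat % 4294967296)
        (y := (-e - 1).toNat % 4294967296) (by omega) (by omega)
      omega
    rw [← compl32 hx, ← compl32 (show (-e - 1).toNat % 4294967296 < 4294967296 by omega),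
      Nat.xor_assoc]

-- B's inner-loop body agrees with the Nat model on nonnegative inputs
lemma pvBitStep_eq (c : Int) (hc : 0 ≤ c) : pvBitStep c = ((natStep c.toNat : Nat) : Int) := by
  unfold pvBitStep natStep
  have hb : PySem.Int.band c 2147483648 = ((c.toNat &&& 2147483648 : Nat) : Int) := by
    simpa using PySem.Int.band_of_nonneg hc (show (0 : Int) ≤ 2147483648 by norm_num)
  have ht : c.toNat &&& 2147483648 = (c.toNat.testBit 31).toNat * 2147483648 := by
    simpa using Nat.and_two_pow c.toNat 31
  rcases h31 : c.toNat.testBit 31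
  · have hz : PySem.Int.band c 2147483648 = 0 := by rw [hb, ht, h31]; simp
    rw [if_neg (by simp [hz]), if_neg (by simp [h31]), band_M, Int.shiftLeft_eq]
    norm_num
    omega
  · have hnz : PySem.Int.band c 2147483648 ≠ 0 := by rw [hb, ht, h31]; simp
    rw [if_pos hnz, if_pos (by simp [h31]), band_M, Int.shiftLeft_eq]
    norm_num
    rw [PySem.Int.bxor_of_nonneg (by omega) (show (0 : Int) ≤ 79764919 by norm_num)]
    have h2 : (c * 2).toNat = c.toNat * 2 := by omega
    rw [h2, show ((79764919 : Int).toNat) = 79764919 from rfl]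

-- the 256-entry table IS eight bit-serial steps on the byte shifted to the top
def pvChk : Bool :=
  (List.range 256).all
    (fun h => PySem.List.pyGetD pvCrcTable (h : Int) 0 == ((natStep8 (h * 16777216) : Nat) : Int))

set_option maxRecDepth 100000 in
lemma pvChk_true : pvChk = true := by decide

lemma table_eq {h : Nat} (hh : h < 256) :
    PySem.List.pyGetD pvCrcTable (h : Int) 0 = ((natStep8 (h * 16777216) : Nat) : Int) := by
  have hall := pvChk_true
  unfold pvChk at hall
  rw [List.all_eq_true] at hall
  simpa using hall h (List.mem_range.mpr hh)

lemma xor_high (hn bn ln : Nat) (hl : ln < 16777216) :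
    (16777216 * hn + ln) ^^^ 16777216 * bn = 16777216 * (hn ^^^ bn) + ln := by
  apply Nat.eq_of_testBit_eq
  intro i
  rw [show (16777216 : Nat) = 2 ^ 24 from by norm_num]
  rw [Nat.testBit_xor,
    Nat.testBit_two_pow_mul_add hn (show ln < 2 ^ 24 by omega) i,
    show (2 ^ 24 * bn : Nat) = 2 ^ 24 * bn + 0 from by ring,
    Nat.testBit_two_pow_mul_add bn (show (0 : Nat) < 2 ^ 24 by norm_num) i,
    Nat.testBit_two_pow_mul_add (hn ^^^ bn) (show ln < 2 ^ 24 by omega) i]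
  by_cases hi : i < 24 <;> simp [hi, Nat.testBit_xor]

lemma add_eq_xor (x ln : Nat) (hl : ln < 16777216) :
    16777216 * x + ln = 16777216 * x ^^^ ln := by
  apply Nat.eq_of_testBit_eq
  intro i
  rw [show (16777216 : Nat) = 2 ^ 24 from by norm_num]
  rw [Nat.testBit_xor,
    Nat.testBit_two_pow_mul_add x (show ln < 2 ^ 24 by omega) i,
    show (2 ^ 24 * x : Nat) = 2 ^ 24 * x + 0 from by ring,
    Nat.testBit_two_pow_mul_add x (show (0 : Nat) < 2 ^ 24 by norm_num) i]
  by_cases hi : i < 24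
  · simp [hi]
  · have : ln.testBit i = false :=
      Nat.testBit_lt_two_pow (lt_of_lt_of_le (show ln < 2 ^ 24 by omega)
        (Nat.pow_le_pow_right (by norm_num) (by omega)))
    simp [hi, this]

-- B's inner 'for _ in range(8)' loop is natStep8 on the Nat model
set_option maxRecDepth 4096 in
lemma inner_fold (N : Nat) :
    (PySem.List.pyRange 0 8 1).foldl (fun c _ => pvBitStep c) ((N : Nat) : Int)
      = ((natStep8 N : Nat) : Int) := by
  rw [show PySem.List.pyRange 0 8 1 = [0, 1, 2, 3, 4, 5, 6, 7] from by decide]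
  simp only [List.foldl_cons, List.foldl_nil]
  rw [pvBitStep_eq _ (Int.natCast_nonneg _), Int.toNat_natCast,
    pvBitStep_eq _ (Int.natCast_nonneg _), Int.toNat_natCast,
    pvBitStep_eq _ (Int.natCast_nonneg _), Int.toNat_natCast,
    pvBitStep_eq _ (Int.natCast_nonneg _), Int.toNat_natCast,
    pvBitStep_eq _ (Int.natCast_nonneg _), Int.toNat_natCast,
    pvBitStep_eq _ (Int.natCast_nonneg _), Int.toNat_natCast,
    pvBitStep_eq _ (Int.natCast_nonneg _), Int.toNat_natCast,
    pvBitStep_eq _ (Int.natCast_nonneg _), Int.toNat_natCast]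
  rfl

-- B's per-byte update, in closed Nat form
lemma stepB_eq (crc d : Int) (h0 : 0 ≤ crc) (h1 : crc < 4294967296) :
    PySem.Int.band (PySem.Int.bxor crc (d <<< (24 : Nat))) 4294967295
      = ((16777216 * (crc.toNat / 16777216 ^^^ (d % 256).toNat) + crc.toNat % 16777216 : Nat) : Int) := by
  rw [Int.shiftLeft_eq, show ((2 : Int) ^ (24 : Nat)) = 16777216 from by norm_num,
    band_M, bxor_mod_2_32 _ _ h0]
  have e1 : crc.toNat % 4294967296 = crc.toNat := by omega
  have e2 : ((d * 16777216) % 4294967296).toNat = (d % 256).toNat * 16777216 := by omega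
  rw [e1, e2]
  congr 1
  have e3 : 16777216 * (crc.toNat / 16777216) + crc.toNat % 16777216 = crc.toNat := by omega
  rw [Nat.mul_comm (d % 256).toNat 16777216]
  conv_lhs => rw [← e3]
  rw [xor_high _ _ _ (show crc.toNat % 16777216 < 16777216 by omega)]

-- A's per-byte update, in closed Nat form
lemma stepA_eq (crc d : Int) (h0 : 0 ≤ crc) (h1 : crc < 4294967296) :
    PySem.Int.bxor (PySem.Int.band (crc <<< (8 : Nat)) 4294967295)
        (PySem.List.pyGetD pvCrcTable
          (PySem.Int.band (PySem.Int.bxor (crc >>> (24 : Nat)) d) 255) 0)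
      = ((crc.toNat % 16777216 * 256
          ^^^ natStep8 ((crc.toNat / 16777216 ^^^ (d % 256).toNat) * 16777216) : Nat) : Int) := by
  have a2 : crc >>> (24 : Nat) = ((crc.toNat / 16777216 : Nat) : Int) := by
    rw [Int.shiftRight_eq_div_pow, show (((2 ^ 24 : Nat) : Int)) = 16777216 from by norm_num]
    omega
  rw [a2, band_255, bxor_mod_256 _ _ (Int.natCast_nonneg _), Int.toNat_natCast,
    Nat.mod_eq_of_lt (show crc.toNat / 16777216 < 256 by omega)]
  have hlt : crc.toNat / 16777216 ^^^ (d % 256).toNat < 256 := by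
    have := Nat.xor_lt_two_pow (n := 8) (x := crc.toNat / 16777216) (y := (d % 256).toNat)
      (by omega) (by omega)
    omega
  rw [table_eq hlt, Int.shiftLeft_eq, show ((2 : Int) ^ (8 : Nat)) = 256 from by norm_num,
    band_M,
    show (crc * 256) % 4294967296 = ((crc.toNat % 16777216 * 256 : Nat) : Int) from by omega,
    PySem.Int.bxor_of_nonneg (Int.natCast_nonneg _) (Int.natCast_nonneg _),
    Int.toNat_natCast, Int.toNat_natCast]

-- the two per-byte updates agree
lemma step_main (crc d : Int) (h0 : 0 ≤ crc) (h1 : crc < 4294967296) :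
    PySem.Int.bxor (PySem.Int.band (crc <<< (8 : Nat)) 4294967295)
        (PySem.List.pyGetD pvCrcTable
          (PySem.Int.band (PySem.Int.bxor (crc >>> (24 : Nat)) d) 255) 0)
      = (PySem.List.pyRange 0 8 1).foldl (fun c _ => pvBitStep c)
          (PySem.Int.band (PySem.Int.bxor crc (d <<< (24 : Nat))) 4294967295) := by
  rw [stepB_eq crc d h0 h1, inner_fold, stepA_eq crc d h0 h1]
  congr 1
  rw [add_eq_xor _ _ (show crc.toNat % 16777216 < 16777216 by omega), natStep8_xor,
    natStep8_low (show crc.toNat % 16777216 < 16777216 by omega),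
    Nat.mul_comm 16777216 (crc.toNat / 16777216 ^^^ (d % 256).toNat), Nat.xor_comm]

lemma stepB_range (crc d : Int) (h0 : 0 ≤ crc) (h1 : crc < 4294967296) :
    0 ≤ (PySem.List.pyRange 0 8 1).foldl (fun c _ => pvBitStep c)
          (PySem.Int.band (PySem.Int.bxor crc (d <<< (24 : Nat))) 4294967295) ∧
      (PySem.List.pyRange 0 8 1).foldl (fun c _ => pvBitStep c)
          (PySem.Int.band (PySem.Int.bxor crc (d <<< (24 : Nat))) 4294967295) < 4294967296 := by
  rw [stepB_eq crc d h0 h1, inner_fold]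
  have := natStep_lt (natStep (natStep (natStep (natStep (natStep (natStep (natStep
    (16777216 * (crc.toNat / 16777216 ^^^ (d % 256).toNat) + crc.toNat % 16777216))))))))
  constructor
  · exact Int.natCast_nonneg _
  · unfold natStep8
    omega

-- the whole byte loops agree, carrying 0 ≤ crc < 2^32
lemma fold_eq (data : List Int) : ∀ (is : List Int) (crc : Int), 0 ≤ crc → crc < 4294967296 →
    is.foldl
      (fun crc i =>
        PySem.Int.bxor (PySem.Int.band (crc <<< (8 : Nat)) 4294967295)
          (PySem.List.pyGetD pvCrcTable
            (PySem.Int.band (PySem.Int.bxor (crc >>> (24 : Nat)) (PySem.List.pyGetD data i 0)) 255) 0))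
      crc
      = is.foldl
        (fun crc i =>
          (PySem.List.pyRange 0 8 1).foldl (fun c _ => pvBitStep c)
            (PySem.Int.band (PySem.Int.bxor crc ((PySem.List.pyGetD data i 0) <<< (24 : Nat))) 4294967295))
        crc := by
  intro is
  induction is with
  | nil => intro crc _ _; rfl
  | cons j t ih =>
      intro crc h0 h1
      simp only [List.foldl_cons]
      rw [step_main crc (PySem.List.pyGetD data j 0) h0 h1]
      have hb := stepB_range crc (PySem.List.pyGetD data j 0) h0 h1
      exact ih _ hb.1 hb.2

-- ===== VERDICT (by name: the statement is the Claim_ definition above) =====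
theorem calCrc32_spec : Claim_equal_calCrc32 := by
  unfold Claim_equal_calCrc32
  intro data _
  unfold Spec_calCrc32 calCrc32 calCrc32_alt
  exact fold_eq data _ 4294967295 (by norm_num) (by norm_num)
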